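-- pv_equiv track=rewrite | github.com/liuweilin17/algorithm | leetcode/1208.py | equalSubstring1
-- ===== SOURCE A (Python) =====
-- def equalSubstring1(s: str, t: str, maxCost: int) -> int:
--     # two pointer
--     N = len(s)
--     left, right = 0, 0
--     sumv = 0
--     max_len = 0
--     while left <= right and left < N:
--         if sumv <= maxCost:
--             if right < N:
--                 sumv += abs(ord(s[right])-ord(t[right]))
--                 right += 1
--             else:
--                 max_len = max(max_len, right-left)
--                 left += 1
--         else:
--             max_len = max(max_len, right-left-1)
--             sumv -= abs(ord(s[left])-ord(t[left]))
--             left += 1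
--
--     return max_len
-- ===== SOURCE B (Python) =====
-- def equalSubstring1(s: str, t: str, maxCost: int) -> int:
--     # prefix-cost table + binary search for the leftmost feasible window start
--     pre = [0]
--     for a, b in zip(s, t):
--         pre.append(pre[-1] + abs(ord(a) - ord(b)))
--     best = 0
--     for r in range(len(pre) - 1):
--         # smallest l with pre[l] >= pre[r+1] - maxCost  (pre is nondecreasing)
--         x = pre[r + 1] - maxCost
--         lo, hi = 0, len(pre)
--         while lo < hi:
--             mid = (lo + hi) // 2
--             if pre[mid] < x:
--                 lo = mid + 1
--             else:
--                 hi = mid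
--         best = max(best, r + 1 - lo)
--     return best
-- ===== Notes on version B (the rewrite author's own statement) =====
-- stated objective: alternative
-- what changed: Replaces the monotone two-pointer sliding window by a two-phase scheme: first materialize the prefix-cost table, then for each right end binary-search the leftmost feasible window start.
import Mathlib
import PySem

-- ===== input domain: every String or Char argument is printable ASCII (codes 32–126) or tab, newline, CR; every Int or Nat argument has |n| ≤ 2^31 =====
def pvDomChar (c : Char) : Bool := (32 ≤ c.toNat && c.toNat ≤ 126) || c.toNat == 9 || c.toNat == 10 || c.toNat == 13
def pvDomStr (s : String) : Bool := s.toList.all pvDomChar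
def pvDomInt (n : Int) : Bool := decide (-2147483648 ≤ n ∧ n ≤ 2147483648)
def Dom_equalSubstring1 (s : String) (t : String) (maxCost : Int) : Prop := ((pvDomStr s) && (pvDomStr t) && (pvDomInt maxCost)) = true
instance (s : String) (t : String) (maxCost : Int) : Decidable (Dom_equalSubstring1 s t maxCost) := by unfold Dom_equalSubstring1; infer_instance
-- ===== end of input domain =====

-- B re-implements A's two-pointer sliding window as prefix-cost table + binary search per right end;
-- the theorems below are about the RETURN value (neither version mutates anything).

-- ===== PORT A =====
-- abs(ord(s[i]) - ord(t[i])); the default is never read on inputs admitted by Pre_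
def pvCost (s t : List Char) (i : Nat) : Int :=
  |((PySem.List.pyGetD s (i : Int) ' ').toNat : Int) - ((PySem.List.pyGetD t (i : Int) ' ').toNat : Int)|

-- the while loop of A; state (left, right, sumv, max_len); fuel 2*N+1 bounds the iterations (each step increments left or right, both ≤ N)
def loopA (s t : List Char) (maxCost : Int) (N : Nat) : Nat → Nat → Nat → Int → Int → Int
  | 0, _, _, _, maxLen => maxLen
  | fuel + 1, left, right, sumv, maxLen =>
    if left ≤ right ∧ left < N then
      if sumv ≤ maxCost then
        if right < N then
          loopA s t maxCost N fuel left (right + 1) (sumv + pvCost s t right) maxLen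
        else
          loopA s t maxCost N fuel (left + 1) right sumv (max maxLen ((right : Int) - (left : Int)))
      else
        loopA s t maxCost N fuel (left + 1) right (sumv - pvCost s t left)
          (max maxLen ((right : Int) - (left : Int) - 1))
    else maxLen

def equalSubstring1 (s : String) (t : String) (maxCost : Int) : Int :=
  let N := s.toList.length
  loopA s.toList t.toList maxCost N (2 * N + 1) 0 0 0 0

-- ===== PORT B =====
-- pre = [0]; for a, b in zip(s, t): pre.append(pre[-1] + abs(ord(a) - ord(b)))
def altPre (s t : List Char) : List Int :=
  (s.zip t).foldl
    (fun acc ab => acc ++ [PySem.List.pyGetD acc (-1) 0 + |((ab.1.toNat : Int)) - ((ab.2.toNat : Int))|])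
    [0]

-- the inner 'while lo < hi' binary search; fuel (= len(pre) at the call) bounds the iterations
def altBisect (pre : List Int) (x : Int) : Nat → Nat → Nat → Nat
  | 0, lo, _ => lo
  | fuel + 1, lo, hi =>
    if lo < hi then
      let mid := (lo + hi) / 2
      if PySem.List.pyGetD pre (mid : Int) 0 < x then altBisect pre x fuel (mid + 1) hi
      else altBisect pre x fuel lo mid
    else lo

def equalSubstring1_alt (s : String) (t : String) (maxCost : Int) : Int :=
  let pre := altPre s.toList t.toList
  (PySem.List.pyRange 0 ((pre.length : Int) - 1) 1).foldl
    (fun best r =>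
      let x := PySem.List.pyGetD pre (r + 1) 0 - maxCost
      let lo := altBisect pre x pre.length 0 pre.length
      max best (r + 1 - (lo : Int)))
    0

-- ===== PRECONDITION & SPEC =====
-- Pre_ excludes exactly the inputs on which A raises IndexError reading t[right] past the end of a t shorter than s
def Pre_equalSubstring1 (s : String) (t : String) (maxCost : Int) : Prop :=
  s.toList.length ≤ t.toList.length ∨ (maxCost < 0 ∧ t.toList ≠ [])
instance (s : String) (t : String) (maxCost : Int) : Decidable (Pre_equalSubstring1 s t maxCost) := by
  unfold Pre_equalSubstring1; infer_instance

def pvWitness_equalSubstring1 : String × String × Int := ("abc", "acd", 1)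

def Spec_equalSubstring1 (s : String) (t : String) (maxCost : Int) (out : Int) : Prop := out = equalSubstring1_alt s t maxCost
instance (s : String) (t : String) (maxCost : Int) (out : Int) : Decidable (Spec_equalSubstring1 s t maxCost out) := by unfold Spec_equalSubstring1; infer_instance

-- ===== CLAIM (what is proved, stated in full; the proofs are below) =====
def Claim_equal_equalSubstring1 : Prop := ∀ (s : String) (t : String) (maxCost : Int), Dom_equalSubstring1 s t maxCost → Pre_equalSubstring1 s t maxCost → Spec_equalSubstring1 s t maxCost (equalSubstring1 s t maxCost)

-- ===== LEMMAS AND PROOFS =====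

-- the per-position transformation costs, and their prefix sums
def pvCosts (s t : List Char) : List Int :=
  (s.zip t).map (fun ab => |((ab.1.toNat : Int)) - ((ab.2.toNat : Int))|)

def pvP (cs : List Int) (k : Nat) : Int := (cs.take k).sum

-- the prefix-sum table B builds, as a map over range
def pvPre (cs : List Int) : List Int := (List.range (cs.length + 1)).map (pvP cs)

-- B's binary-search value for right end r
def pvBr (cs : List Int) (maxCost : Int) (r : Nat) : Nat :=
  altBisect (pvPre cs) (pvP cs (r + 1) - maxCost) (cs.length + 1) 0 (cs.length + 1)

-- the common reference value both programs compute
def pvS (cs : List Int) (maxCost : Int) : Int :=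
  (List.range cs.length).foldl
    (fun best (k : Nat) => max best (((k : Int) + 1) - (pvBr cs maxCost k : Int))) 0

lemma pvCosts_nonneg (s t : List Char) : ∀ x ∈ pvCosts s t, 0 ≤ x := by
  intro x hx
  simp only [pvCosts, List.mem_map] at hx
  obtain ⟨ab, _, rfl⟩ := hx
  exact abs_nonneg _

lemma pvCosts_length (s t : List Char) : (pvCosts s t).length = min s.length t.length := by
  simp [pvCosts]

lemma pvP_succ (cs : List Int) (k : Nat) (h : k < cs.length) :
    pvP cs (k + 1) = pvP cs k + cs.getD k 0 := by
  rw [pvP, pvP, List.sum_take_succ cs k h, List.getD_eq_getElem?_getD,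
    List.getElem?_eq_getElem h]
  rfl

lemma pvP_mono (cs : List Int) (hnn : ∀ x ∈ cs, 0 ≤ x) {j k : Nat} (h : j ≤ k) :
    pvP cs j ≤ pvP cs k := by
  have : cs.take k = cs.take j ++ (cs.drop j).take (k - j) := by
    rw [← List.take_add]
    congr 1
    omega
  simp only [pvP, this, List.sum_append, le_add_iff_nonneg_right]
  refine List.sum_nonneg ?_
  intro x hx
  exact hnn x (List.mem_of_mem_drop (List.mem_of_mem_take hx))

lemma lt_of_pvP_lt (cs : List Int) (hnn : ∀ x ∈ cs, 0 ≤ x) {j k : Nat}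
    (h : pvP cs j < pvP cs k) : j < k := by
  by_contra hc
  exact absurd (pvP_mono cs hnn (by omega : k ≤ j)) (by omega)

lemma pvCost_eq (s t : List Char) (i : Nat) (h : i < (pvCosts s t).length) :
    pvCost s t i = (pvCosts s t).getD i 0 := by
  have hs : i < s.length := by rw [pvCosts_length] at h; omega
  have ht : i < t.length := by rw [pvCosts_length] at h; omega
  have hz : i < (s.zip t).length := by simpa using (by rw [pvCosts_length] at h; omega : i < min s.length t.length)
  simp [pvCost, pvCosts, PySem.List.pyGetD_natCast, List.getD_eq_getElem?_getD,
    List.getElem?_eq_getElem hs, List.getElem?_eq_getElem ht,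
    List.getElem?_eq_getElem (by simpa [pvCosts] using h : i < ((s.zip t).map _).length),
    List.getElem_zip]

lemma pvPre_getD (cs : List Int) (j : Nat) (hj : j < cs.length + 1) :
    (pvPre cs).getD j 0 = pvP cs j := by
  simp [pvPre, List.getD_eq_getElem?_getD, List.getElem?_map,
    List.getElem?_range hj]

lemma pvPre_length (cs : List Int) : (pvPre cs).length = cs.length + 1 := by
  simp [pvPre]

lemma altPre_aux (z : List (Char × Char)) :
    z.foldl
      (fun acc ab => acc ++ [PySem.List.pyGetD acc (-1) 0 + |((ab.1.toNat : Int)) - ((ab.2.toNat : Int))|])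
      [0] =
    (List.range (z.length + 1)).map
      (pvP (z.map (fun ab => |((ab.1.toNat : Int)) - ((ab.2.toNat : Int))|))) := by
  induction z using List.reverseRecOn with
  | nil => simp [pvP]
  | append_singleton z ab ih =>
    rw [List.foldl_append, List.foldl_cons, List.foldl_nil, ih]
    have hne : (List.range (z.length + 1)).map
        (pvP (z.map (fun ab => |((ab.1.toNat : Int)) - ((ab.2.toNat : Int))|))) ≠ [] := by
      simp
    rw [PySem.List.pyGetD_neg_one _ _ hne, List.getLast_eq_getElem]
    simp only [List.length_map, List.length_range, Nat.add_sub_cancel, List.getElem_map,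
      List.getElem_range]
    have hlen : (z.map (fun ab => |((ab.1.toNat : Int)) - ((ab.2.toNat : Int))|)).length
        = z.length := by simp
    rw [List.length_append, List.length_singleton, List.map_append,
      show List.range (z.length + 1 + 1) = List.range (z.length + 1) ++ [z.length + 1] from
        List.range_succ,
      List.map_append]
    congr 1
    · apply List.map_congr_left
      intro k hk
      have hk' : k ≤ z.length := Nat.lt_succ_iff.mp (List.mem_range.mp hk)
      simp only [pvP]
      rw [List.take_append_of_le_length (by simpa using hk')]
    · simp only [List.map_singleton, List.cons.injEq, and_true]
      rw [pvP, pvP, List.take_of_length_le (by simp), List.take_of_length_le (by simp),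
        List.sum_append]
      simp

lemma altPre_eq (s t : List Char) : altPre s t = pvPre (pvCosts s t) := by
  rw [altPre, altPre_aux, pvPre, pvCosts]
  simp

lemma altBisect_correct (pre : List Int) (x : Int)
    (hmono : ∀ i j : Nat, i ≤ j → j < pre.length → pre.getD i 0 ≤ pre.getD j 0) :
    ∀ fuel lo hi, lo ≤ hi → hi ≤ pre.length → hi - lo ≤ fuel →
    (∀ j < lo, pre.getD j 0 < x) →
    (∀ j : Nat, hi ≤ j → j < pre.length → x ≤ pre.getD j 0) →
    altBisect pre x fuel lo hi ≤ pre.length ∧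
    (∀ j < altBisect pre x fuel lo hi, pre.getD j 0 < x) ∧
    (∀ j : Nat, altBisect pre x fuel lo hi ≤ j → j < pre.length → x ≤ pre.getD j 0) := by
  intro fuel
  induction fuel with
  | zero =>
    intro lo hi h1 h2 h3 h4 h5
    exact ⟨by simp [altBisect]; omega, by simpa [altBisect] using h4,
      fun j hj1 hj2 => h5 j (by simp [altBisect] at hj1; omega) hj2⟩
  | succ fuel ih =>
    intro lo hi h1 h2 h3 h4 h5
    simp only [altBisect]
    by_cases hlh : lo < hi
    · rw [if_pos hlh]
      have hml : lo ≤ (lo + hi) / 2 := by omega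
      have hmh : (lo + hi) / 2 < hi := by omega
      have hgd : PySem.List.pyGetD pre (((lo + hi) / 2 : Nat) : Int) 0
          = pre.getD ((lo + hi) / 2) 0 := PySem.List.pyGetD_natCast _ _ _
      by_cases hx : PySem.List.pyGetD pre (((lo + hi) / 2 : Nat) : Int) 0 < x
      · simp only [if_pos hx]
        refine ih ((lo + hi) / 2 + 1) hi (by omega) h2 (by omega) ?_ h5
        intro j hj
        calc pre.getD j 0 ≤ pre.getD ((lo + hi) / 2) 0 :=
              hmono j ((lo + hi) / 2) (by omega) (by omega)
          _ < x := by rw [← hgd]; exact hx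
      · simp only [if_neg hx]
        push_neg at hx
        rw [hgd] at hx
        refine ih lo ((lo + hi) / 2) hml (by omega) (by omega) h4 ?_
        intro j hj1 hj2
        exact le_trans hx (hmono ((lo + hi) / 2) j hj1 hj2)
    · rw [if_neg hlh]
      exact ⟨by omega, h4, fun j hj1 hj2 => h5 j (by omega) hj2⟩

lemma pvBr_correct (cs : List Int) (maxCost : Int) (hnn : ∀ x ∈ cs, 0 ≤ x) (r : Nat) :
    pvBr cs maxCost r ≤ cs.length + 1 ∧
    (∀ j < pvBr cs maxCost r, pvP cs j < pvP cs (r + 1) - maxCost) ∧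
    (∀ j : Nat, pvBr cs maxCost r ≤ j → j ≤ cs.length →
      pvP cs (r + 1) - maxCost ≤ pvP cs j) := by
  have hmono : ∀ i j : Nat, i ≤ j → j < (pvPre cs).length →
      (pvPre cs).getD i 0 ≤ (pvPre cs).getD j 0 := by
    intro i j hij hj
    rw [pvPre_length] at hj
    rw [pvPre_getD _ _ (by omega), pvPre_getD _ _ (by omega)]
    exact pvP_mono cs hnn hij
  have h := altBisect_correct (pvPre cs) (pvP cs (r + 1) - maxCost) hmono
    (cs.length + 1) 0 (cs.length + 1) (by omega) (by rw [pvPre_length]) (by omega)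
    (fun j hj => absurd hj (by omega))
    (fun j hj1 hj2 => by rw [pvPre_length] at hj2; omega)
  rw [pvPre_length] at h
  have hbr : pvBr cs maxCost r
      = altBisect (pvPre cs) (pvP cs (r + 1) - maxCost) (cs.length + 1) 0 (cs.length + 1) := rfl
  rw [hbr]
  refine ⟨h.1, ?_, ?_⟩
  · intro j hj
    have hle := h.1
    have := h.2.1 j hj
    rwa [pvPre_getD _ _ (by omega)] at this
  · intro j hj1 hj2
    have := h.2.2 j hj1 (by omega)
    rwa [pvPre_getD _ _ (by omega)] at this

-- m ≤ Br r whenever every l < m is infeasible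
lemma le_pvBr (cs : List Int) (maxCost : Int) (hnn : ∀ x ∈ cs, 0 ≤ x) (r m : Nat)
    (hm : m ≤ cs.length + 1)
    (h : ∀ l < m, maxCost < pvP cs (r + 1) - pvP cs l) : m ≤ pvBr cs maxCost r := by
  by_contra hc
  push_neg at hc
  have h3 := (pvBr_correct cs maxCost hnn r).2.2 (pvBr cs maxCost r) le_rfl (by omega)
  have := h _ hc
  omega

-- Br r ≤ m whenever m is feasible
lemma pvBr_le (cs : List Int) (maxCost : Int) (hnn : ∀ x ∈ cs, 0 ≤ x) (r m : Nat)
    (_hm : m ≤ cs.length)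
    (h : pvP cs (r + 1) - pvP cs m ≤ maxCost) : pvBr cs maxCost r ≤ m := by
  by_contra hc
  push_neg at hc
  have := (pvBr_correct cs maxCost hnn r).2.1 m hc
  omega

lemma foldl_max_le_int {β : Type} (xs : List β) (f : β → Int) (init X : Int)
    (h0 : init ≤ X) (h : ∀ x ∈ xs, f x ≤ X) :
    xs.foldl (fun a x => max a (f x)) init ≤ X := by
  induction xs generalizing init with
  | nil => simpa using h0
  | cons y ys ih =>
    simp only [List.foldl_cons]
    exact ih _ (max_le h0 (h y (by simp))) (fun x hx => h x (by simp [hx]))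

lemma pvS_nonneg (cs : List Int) (maxCost : Int) : 0 ≤ pvS cs maxCost := by
  unfold pvS
  exact (PySem.List.le_foldl_max_int (List.range cs.length)
    (fun k => ((k : Int) + 1) - (pvBr cs maxCost k : Int)) 0).1

lemma term_le_pvS (cs : List Int) (maxCost : Int) (k : Nat) (hk : k < cs.length) :
    ((k : Int) + 1) - (pvBr cs maxCost k : Int) ≤ pvS cs maxCost := by
  unfold pvS
  exact (PySem.List.le_foldl_max_int (List.range cs.length)
    (fun k => ((k : Int) + 1) - (pvBr cs maxCost k : Int)) 0).2 k (List.mem_range.mpr hk)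

lemma pvS_le (cs : List Int) (maxCost : Int) (X : Int) (h0 : 0 ≤ X)
    (h : ∀ k < cs.length, ((k : Int) + 1) - (pvBr cs maxCost k : Int) ≤ X) :
    pvS cs maxCost ≤ X := by
  unfold pvS
  exact foldl_max_le_int _ _ _ _ h0 (fun k hk => h k (List.mem_range.mp hk))

-- B's program computes pvS
lemma alt_eq_pvS (s t : String) (maxCost : Int) :
    equalSubstring1_alt s t maxCost = pvS (pvCosts s.toList t.toList) maxCost := by
  simp only [equalSubstring1_alt]
  rw [altPre_eq]
  have hlen : (pvPre (pvCosts s.toList t.toList)).length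
      = (pvCosts s.toList t.toList).length + 1 := pvPre_length _
  rw [hlen]
  have hcast : (((pvCosts s.toList t.toList).length + 1 : Nat) : Int) - 1
      = (((pvCosts s.toList t.toList).length : Nat) : Int) := by push_cast; ring
  rw [hcast, PySem.List.pyRange_zero_nat, List.foldl_map, pvS]
  apply PySem.List.foldl_congr_mem
  intro acc k hk
  have hk' : k < (pvCosts s.toList t.toList).length := List.mem_range.mp hk
  have h1 : ((k : Int) + 1) = (((k + 1 : Nat)) : Int) := by push_cast; ring
  rw [h1, PySem.List.pyGetD_natCast, pvPre_getD _ _ (by omega)]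
  rfl

-- B returns 0 for a negative budget
lemma pvS_of_neg (cs : List Int) (maxCost : Int) (hnn : ∀ x ∈ cs, 0 ≤ x)
    (hmc : maxCost < 0) : pvS cs maxCost = 0 := by
  have h1 := pvS_nonneg cs maxCost
  have h2 : pvS cs maxCost ≤ 0 := by
    apply pvS_le cs maxCost 0 le_rfl
    intro k hk
    have hbr : k + 1 ≤ pvBr cs maxCost k := by
      apply le_pvBr cs maxCost hnn k (k + 1) (by omega)
      intro l hl
      have := pvP_mono cs hnn (by omega : l ≤ k + 1)
      omega
    omega
  omega

-- A returns 0 for a negative budget: the first loop iteration takes the else branch and then left > right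
lemma loopA_neg (s t : List Char) (maxCost : Int) (hmc : maxCost < 0) (N : Nat) :
    ∀ fuel, loopA s t maxCost N fuel 0 0 0 0 = 0 := by
  intro fuel
  match fuel with
  | 0 => rfl
  | fuel + 1 =>
    rw [loopA]
    by_cases hN : 0 < N
    · rw [if_pos ⟨le_rfl, hN⟩, if_neg (by omega)]
      match fuel with
      | 0 =>
        show max 0 ((0 : Int) - 0 - 1) = 0
        norm_num
      | fuel + 1 =>
        rw [loopA, if_neg (by omega)]
        norm_num
    · rw [if_neg (by omega)]

lemma loopA_of_neg (s t : String) (maxCost : Int) (hmc : maxCost < 0) :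
    equalSubstring1 s t maxCost = 0 := by
  show loopA s.toList t.toList maxCost s.toList.length (2 * s.toList.length + 1) 0 0 0 0 = 0
  exact loopA_neg s.toList t.toList maxCost hmc s.toList.length _

-- the tail of A's loop once right = N and the window is feasible
lemma loopA_drain (s t : List Char) (maxCost : Int) (n : Nat) :
    ∀ fuel left (sumv maxLen : Int), sumv ≤ maxCost → left ≤ n → n + 1 ≤ fuel + left →
    loopA s t maxCost n fuel left n sumv maxLen =
      if left < n then max maxLen ((n : Int) - left) else maxLen := by
  intro fuel
  induction fuel with
  | zero =>
    intro left sumv maxLen h1 h2 h3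
    exact absurd h3 (by omega)
  | succ fuel ih =>
    intro left sumv maxLen h1 h2 h3
    rw [loopA]
    by_cases hln : left < n
    · rw [if_pos ⟨by omega, hln⟩, if_pos h1, if_neg (lt_irrefl n),
        ih (left + 1) sumv (max maxLen ((n : Int) - left)) h1 (by omega) (by omega),
        if_pos hln]
      by_cases h4 : left + 1 < n
      · rw [if_pos h4]
        omega
      · rw [if_neg h4]
    · rw [if_neg (fun hc => hln hc.2), if_neg hln]

-- the main invariant induction for A's two-pointer loop
lemma loopA_eq_pvS (s t : List Char) (maxCost : Int) (hmc : 0 ≤ maxCost) :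
    ∀ fuel left right (sumv maxLen : Int),
    (2 * (pvCosts s t).length + 1 ≤ fuel + left + right) → left ≤ right →
    right ≤ (pvCosts s t).length →
    sumv = pvP (pvCosts s t) right - pvP (pvCosts s t) left → 0 ≤ maxLen →
    (∀ l < left, maxCost < pvP (pvCosts s t) right - pvP (pvCosts s t) l) →
    (∀ r < right, ((r : Int) + 1) - (pvBr (pvCosts s t) maxCost r : Int) ≤
      max maxLen ((right : Int) - left)) →
    (maxCost < sumv → ∀ r < right, ((r : Int) + 1) - (pvBr (pvCosts s t) maxCost r : Int) ≤
      max maxLen ((right : Int) - left - 1)) →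
    maxLen ≤ pvS (pvCosts s t) maxCost →
    (right : Int) - left - 1 ≤ pvS (pvCosts s t) maxCost →
    loopA s t maxCost (pvCosts s t).length fuel left right sumv maxLen =
      pvS (pvCosts s t) maxCost := by
  intro fuel
  induction fuel with
  | zero =>
    intro left right sumv maxLen h1 h2 h3 hs hml hleft hgew hges hlem hlew
    exact absurd h1 (by omega)
  | succ fuel ih =>
    intro left right sumv maxLen h1 h2 h3 hs hml hleft hgew hges hlem hlew
    have hnn := pvCosts_nonneg s t
    rw [loopA]
    by_cases hln : left < (pvCosts s t).length
    · rw [if_pos ⟨h2, hln⟩]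
      by_cases hsm : sumv ≤ maxCost
      · rw [if_pos hsm]
        by_cases hrn : right < (pvCosts s t).length
        · rw [if_pos hrn]
          have hcost : pvCost s t right = (pvCosts s t).getD right 0 := pvCost_eq s t right hrn
          have hPsucc := pvP_succ (pvCosts s t) right hrn
          have hleft' : ∀ l < left,
              maxCost < pvP (pvCosts s t) (right + 1) - pvP (pvCosts s t) l := by
            intro l hl
            have h := hleft l hl
            have := pvP_mono (pvCosts s t) hnn (by omega : right ≤ right + 1)
            omega
          have hbrR : left ≤ pvBr (pvCosts s t) maxCost right :=
            le_pvBr _ _ hnn right left (by omega) hleft'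
          have hbrRc : (left : Int) ≤ (pvBr (pvCosts s t) maxCost right : Int) := by
            exact_mod_cast hbrR
          refine ih left (right + 1) (sumv + pvCost s t right) maxLen (by omega) (by omega)
            (by omega) (by rw [hcost]; omega) hml hleft' ?_ ?_ hlem ?_
          · intro r hr
            by_cases hr' : r < right
            · have := hgew r hr'
              omega
            · have hrr : r = right := by omega
              subst hrr
              omega
          · intro hgt r hr
            by_cases hr' : r < right
            · have := hgew r hr'
              omega
            · have hrr : r = right := by omega
              subst hrr
              rw [hcost] at hgt
              have hbrR2 : left + 1 ≤ pvBr (pvCosts s t) maxCost r := by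
                apply le_pvBr _ _ hnn r (left + 1) (by omega)
                intro l hl
                by_cases hll : l < left
                · exact hleft' l hll
                · have : l = left := by omega
                  subst this
                  omega
              have : ((left : Int)) + 1 ≤ (pvBr (pvCosts s t) maxCost r : Int) := by
                exact_mod_cast hbrR2
              omega
          · rcases Nat.eq_zero_or_pos right with hr0 | hr0
            · have hl0 : left = 0 := by omega
              have := pvS_nonneg (pvCosts s t) maxCost
              subst hr0 hl0
              push_cast
              omega
            · have hfeas : pvBr (pvCosts s t) maxCost (right - 1) ≤ left := by
                apply pvBr_le _ _ hnn (right - 1) left (by omega)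
                have h' : right - 1 + 1 = right := by omega
                rw [h']
                omega
              have hterm := term_le_pvS (pvCosts s t) maxCost (right - 1) (by omega)
              have hc1 : (((right - 1 : Nat)) : Int) = (right : Int) - 1 := by omega
              have hc2 : ((pvBr (pvCosts s t) maxCost (right - 1) : Nat) : Int) ≤ (left : Int) := by
                exact_mod_cast hfeas
              omega
        · rw [if_neg hrn]
          have hreq : right = (pvCosts s t).length := by omega
          rw [hreq, loopA_drain s t maxCost (pvCosts s t).length fuel (left + 1) sumv
            (max maxLen (((pvCosts s t).length : Int) - left)) hsm (by omega) (by omega)]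
          have hfeas : pvBr (pvCosts s t) maxCost (right - 1) ≤ left := by
            apply pvBr_le _ _ hnn (right - 1) left (by omega)
            have h' : right - 1 + 1 = right := by omega
            rw [h']
            omega
          have hterm := term_le_pvS (pvCosts s t) maxCost (right - 1) (by omega)
          have hc1 : (((right - 1 : Nat)) : Int) = (right : Int) - 1 := by omega
          have hc2 : ((pvBr (pvCosts s t) maxCost (right - 1) : Nat) : Int) ≤ (left : Int) := by
            exact_mod_cast hfeas
          have hlb : pvS (pvCosts s t) maxCost ≤ max maxLen ((right : Int) - left) :=
            pvS_le _ _ _ (by omega) (fun r hr => by have := hgew r (by omega); omega)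
          split_ifs with h4
          · omega
          · omega
      · rw [if_neg hsm]
        push_neg at hsm
        have hlr : left < right := by
          apply lt_of_pvP_lt _ hnn
          omega
        have hcost : pvCost s t left = (pvCosts s t).getD left 0 := pvCost_eq s t left hln
        have hPsucc := pvP_succ (pvCosts s t) left hln
        refine ih (left + 1) right (sumv - pvCost s t left)
          (max maxLen ((right : Int) - left - 1)) (by omega) (by omega) h3
          (by rw [hcost]; omega) (by omega) ?_ ?_ ?_ (by omega) (by omega)
        · intro l hl
          by_cases hll : l < left
          · exact hleft l hll
          · have : l = left := by omega
            subst this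
            omega
        · intro r hr
          have := hges hsm r hr
          omega
        · intro _ r hr
          have := hges hsm r hr
          omega
    · rw [if_neg (fun hc => hln hc.2)]
      have hlb : pvS (pvCosts s t) maxCost ≤ maxLen :=
        pvS_le _ _ _ hml (fun r hr => by have := hgew r (by omega); omega)
      omega

-- ===== VERDICT (by name: the statement is the Claim_ definition above) =====
theorem equalSubstring1_spec : Claim_equal_equalSubstring1 := by
  intro s t maxCost _ hpre
  unfold Spec_equalSubstring1
  rw [alt_eq_pvS]
  by_cases hmc : maxCost < 0
  · rw [loopA_of_neg s t maxCost hmc, pvS_of_neg _ _ (pvCosts_nonneg _ _) hmc]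
  · push_neg at hmc
    have hst : s.toList.length ≤ t.toList.length := by
      rcases hpre with h | ⟨h, _⟩
      · exact h
      · omega
    have hN : s.toList.length = (pvCosts s.toList t.toList).length := by
      rw [pvCosts_length]; omega
    show loopA s.toList t.toList maxCost s.toList.length
        (2 * s.toList.length + 1) 0 0 0 0 = _
    rw [hN]
    exact loopA_eq_pvS s.toList t.toList maxCost hmc _ 0 0 0 0
      (by omega) (by omega) (by omega) (by simp) (by omega)
      (by omega) (by omega) (fun _ r hr => absurd hr (by omega))
      (pvS_nonneg _ _) (by have := pvS_nonneg (pvCosts s.toList t.toList) maxCost; omega)
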